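-- pv_equiv track=rewrite | github.com/MarceloMassarente/Verba | ingestor/etl_a2.py | _normalize_mentions
-- ===== SOURCE A (Python) =====
-- from typing import List, Callable, Dict
--
-- def _normalize_mentions(mentions: List[Dict], gaz: Dict) -> List[str]:
--     """Normaliza menções para entity_ids via gazetteer"""
--     if not mentions or not gaz:
--         return []
--
--     text_mentions = {m["text"].lower() for m in mentions}
--     ids = []
--
--     for eid, aliases in gaz.items():
--         if any(a.lower() in text_mentions for a in aliases):
--             ids.append(eid)
--
--     return sorted(set(ids))
-- ===== SOURCE B (Python) =====
-- from typing import List, Dict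
--
-- def _normalize_mentions(mentions: List[Dict], gaz: Dict) -> List[str]:
--     """Normaliza menções para entity_ids via gazetteer (inverted alias index)."""
--     if not mentions or not gaz:
--         return []
--     index = {}
--     for eid, aliases in gaz.items():
--         for a in aliases:
--             index.setdefault(a.lower(), []).append(eid)
--     result = set()
--     for m in mentions:
--         result.update(index.get(m["text"].lower(), []))
--     return sorted(result)
-- ===== Notes on version B (the rewrite author's own statement) =====
-- stated objective: alternative
-- what changed: B reverses the traversal: after the same emptiness guard it builds an inverted index from lowercased alias to the entity ids owning it in one pass over the gazetteer, then does mention-driven lookups into that index and returns the sorted result set, instead of A's gazetteer-driven loop testing each entity's aliases against a set of mention texts.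
import Mathlib
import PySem

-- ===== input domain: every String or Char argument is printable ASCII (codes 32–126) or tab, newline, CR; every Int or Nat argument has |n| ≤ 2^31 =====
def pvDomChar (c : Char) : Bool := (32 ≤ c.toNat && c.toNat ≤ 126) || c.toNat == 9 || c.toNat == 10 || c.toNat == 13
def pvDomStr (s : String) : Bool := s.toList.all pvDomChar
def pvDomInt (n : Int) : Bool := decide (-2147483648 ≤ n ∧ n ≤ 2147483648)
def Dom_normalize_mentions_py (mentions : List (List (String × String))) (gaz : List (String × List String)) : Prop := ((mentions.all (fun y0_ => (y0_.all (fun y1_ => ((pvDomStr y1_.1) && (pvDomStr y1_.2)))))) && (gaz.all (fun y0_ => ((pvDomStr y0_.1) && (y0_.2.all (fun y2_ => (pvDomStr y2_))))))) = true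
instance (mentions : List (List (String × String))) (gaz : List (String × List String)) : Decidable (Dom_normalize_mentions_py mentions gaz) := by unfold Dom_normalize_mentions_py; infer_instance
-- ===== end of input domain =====

-- B keeps A's emptiness guard but reverses the traversal: an inverted alias→entity-ids index with
-- mention-driven lookups instead of A's gazetteer-driven membership tests (alternative decomposition).

-- ===== PORT A =====
def normalize_mentions_py (mentions : List (List (String × String))) (gaz : List (String × List String)) : List String :=
  if mentions = [] ∨ gaz = [] then []
  else
    let text_mentions : PySem.Set String :=
      PySem.Set.ofList (mentions.map (fun m => PySem.Str.lower ((PySem.Dict.ofList m).getD "text" "")))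
    let ids : List String :=
      gaz.foldl (fun ids p =>
        if p.2.any (fun a => PySem.Set.contains text_mentions (PySem.Str.lower a)) then ids ++ [p.1] else ids) []
    PySem.List.sorted (PySem.Set.ofList ids) (fun x => x) false

-- ===== PORT B =====
def normalize_mentions_py_alt (mentions : List (List (String × String))) (gaz : List (String × List String)) : List String :=
  if mentions = [] ∨ gaz = [] then []
  else
    let index : PySem.Dict String (List String) :=
      gaz.foldl (fun d p =>
        p.2.foldl (fun d a => PySem.Dict.modify d (PySem.Str.lower a) [] (fun l => l ++ [p.1])) d)
        PySem.Dict.empty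
    let result : PySem.Set String :=
      mentions.foldl (fun s m =>
        PySem.Set.update s (PySem.Dict.getD index (PySem.Str.lower ((PySem.Dict.ofList m).getD "text" "")) []))
        PySem.Set.empty
    PySem.List.sorted result (fun x => x) false

-- ===== PRECONDITION & SPEC =====
-- Pre_ excludes exactly the inputs on which A raises KeyError: both arguments non-empty while some
-- mention dict lacks a "text" key (B raises there too).
def Pre_normalize_mentions_py (mentions : List (List (String × String))) (gaz : List (String × List String)) : Prop :=
  mentions = [] ∨ gaz = [] ∨ mentions.all (fun m => m.any (fun p => p.1 == "text")) = true
instance (mentions : List (List (String × String))) (gaz : List (String × List String)) : Decidable (Pre_normalize_mentions_py mentions gaz) := by unfold Pre_normalize_mentions_py; infer_instance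

def pvWitness_normalize_mentions_py : (List (List (String × String))) × (List (String × List String)) :=
  ([[("text", "Foo")]], [("E1", ["foo", "bar"])])

def Spec_normalize_mentions_py (mentions : List (List (String × String))) (gaz : List (String × List String)) (out : List String) : Prop := out = normalize_mentions_py_alt mentions gaz
instance (mentions : List (List (String × String))) (gaz : List (String × List String)) (out : List String) : Decidable (Spec_normalize_mentions_py mentions gaz out) := by unfold Spec_normalize_mentions_py; infer_instance

-- ===== CLAIM (what is proved, stated in full; the proofs are below) =====
def Claim_equal_normalize_mentions_py : Prop := ∀ (mentions : List (List (String × String))) (gaz : List (String × List String)), Dom_normalize_mentions_py mentions gaz → Pre_normalize_mentions_py mentions gaz → Spec_normalize_mentions_py mentions gaz (normalize_mentions_py mentions gaz)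

-- ===== LEMMAS AND PROOFS =====

def pvPairs (gaz : List (String × List String)) : List (String × String) :=
  gaz.flatMap (fun p => p.2.map (fun a => (PySem.Str.lower a, p.1)))

theorem pv_idx_flat (gaz : List (String × List String)) (d : PySem.Dict String (List String)) :
    gaz.foldl (fun d p =>
      p.2.foldl (fun d a => PySem.Dict.modify d (PySem.Str.lower a) [] (fun l => l ++ [p.1])) d) d
    = (pvPairs gaz).foldl (fun d q => PySem.Dict.modify d q.1 [] (fun l => l ++ [q.2])) d := by
  induction gaz generalizing d with
  | nil => simp [pvPairs]
  | cons p t ih =>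
    simp only [List.foldl_cons, pvPairs, List.flatMap_cons, List.foldl_append, List.foldl_map]
    rw [ih]; rfl

theorem pv_idx_getD (gaz : List (String × List String)) (c : String) :
    (gaz.foldl (fun d p =>
      p.2.foldl (fun d a => PySem.Dict.modify d (PySem.Str.lower a) [] (fun l => l ++ [p.1])) d)
      PySem.Dict.empty).getD c []
    = ((pvPairs gaz).filter (fun q => q.1 == c)).map (fun q => q.2) := by
  rw [pv_idx_flat, PySem.Dict.getD_foldl_modify_append]
  simp [PySem.Dict.getD, PySem.Dict.get?, PySem.Dict.empty]

theorem pv_mem_foldl_update {β : Type} (f : β → List String) (l : List β) (s : PySem.Set String) (y : String) :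
    y ∈ l.foldl (fun s m => PySem.Set.update s (f m)) s ↔ y ∈ s ∨ ∃ m ∈ l, y ∈ f m := by
  induction l generalizing s with
  | nil => simp
  | cons m t ih => simp [ih, PySem.Set.mem_update]; tauto

theorem pv_nodup_foldl_update {β : Type} (f : β → List String) (l : List β) (s : PySem.Set String)
    (h : s.Nodup) : (l.foldl (fun s m => PySem.Set.update s (f m)) s).Nodup := by
  induction l generalizing s with
  | nil => exact h
  | cons m t ih => exact ih _ (PySem.Set.nodup_update _ _ h)

theorem pv_ports_eq (mentions : List (List (String × String))) (gaz : List (String × List String)) :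
    normalize_mentions_py mentions gaz = normalize_mentions_py_alt mentions gaz := by
  unfold normalize_mentions_py normalize_mentions_py_alt
  by_cases hg : mentions = [] ∨ gaz = []
  · simp only [if_pos hg]
  · simp only [if_neg hg]
    apply PySem.List.sorted_eq_sorted_of_perm _ _ _ (fun a b h => h)
    rw [List.perm_ext_iff_of_nodup (PySem.Set.nodup_ofList _)
      (pv_nodup_foldl_update _ _ _ (by simp [PySem.Set.empty]))]
    intro y
    rw [pv_mem_foldl_update (fun m => PySem.Dict.getD _ (PySem.Str.lower ((PySem.Dict.ofList m).getD "text" "")) []),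
      PySem.Set.mem_ofList, PySem.List.foldl_append_if (fun p : String × List String => p.2.any (fun a => (PySem.Set.ofList (mentions.map (fun m => PySem.Str.lower ((PySem.Dict.ofList m).getD "text" "")))).contains (PySem.Str.lower a))) (fun p => p.1) gaz []]
    simp only [pv_idx_getD, pvPairs, List.nil_append, List.mem_map, List.mem_filter,
      List.mem_flatMap, List.any_eq_true, PySem.Set.contains_iff, PySem.Set.mem_ofList,
      PySem.Set.empty, List.not_mem_nil, false_or]
    constructor
    · rintro ⟨p, ⟨hp, a, ha, m, hm, hl⟩, rfl⟩
      exact ⟨m, hm, ⟨_, _⟩, ⟨⟨p, hp, a, ha, rfl⟩, by simpa using hl.symm⟩, rfl⟩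
    · rintro ⟨m, hm, ⟨q, ⟨⟨p, hp, a, ha, rfl⟩, hq⟩, rfl⟩⟩
      exact ⟨p, ⟨hp, a, ha, m, hm, by simp only [beq_iff_eq] at hq; exact hq.symm⟩, rfl⟩

-- ===== VERDICT (by name: the statement is the Claim_ definition above) =====
theorem normalize_mentions_py_spec : Claim_equal_normalize_mentions_py := by
  intro mentions gaz _ _
  unfold Spec_normalize_mentions_py
  exact pv_ports_eq mentions gaz
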